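-- pv_equiv track=rewrite | github.com/BlasruizSantiago/MOVI | main.py | usuarioMasGasto
-- ===== SOURCE A (Python) =====
-- def usuarioMasGasto(mTransporte, usrActivos):
--     gastosTotales = [0 for _ in range(len(usrActivos))] # Inicializa una lista para almacenar los gastos totales de cada usuario
--     for h in range(3): # Recorre las 3 matrices (Colectivo, Tren, Subte)
--         for i in range(len(usrActivos)): # Recorre cada usuario
--             gastosTotales[i] += sum(mTransporte[h][i]) # Suma los gastos de cada usuario en la matriz actual
--     maxGasto = max(gastosTotales) # Encuentra el gasto máximo
--     usuarioMaxGasto = usrActivos[gastosTotales.index(maxGasto)] # Encuentra el usuario correspondiente al gasto máximo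
--     return usuarioMaxGasto, maxGasto
-- ===== SOURCE B (Python) =====
-- def usuarioMasGasto(mTransporte, usrActivos):
--     # Single pass over users: running best (user, total), strict '>' keeps the first maximum.
--     best = None
--     for i, u in enumerate(usrActivos):
--         total = sum(mTransporte[0][i]) + sum(mTransporte[1][i]) + sum(mTransporte[2][i])
--         if best is None or total > best[1]:
--             best = (u, total)
--     return best[0], best[1]
-- ===== Notes on version B (the rewrite author's own statement) =====
-- stated objective: simpler
-- what changed: Replaces the three-pass totals array plus max()+list.index() lookup by a single pass over users that keeps a running (bestUser, bestTotal) argmax with strict '>', so no totals list, no max and no index scan.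
import Mathlib
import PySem

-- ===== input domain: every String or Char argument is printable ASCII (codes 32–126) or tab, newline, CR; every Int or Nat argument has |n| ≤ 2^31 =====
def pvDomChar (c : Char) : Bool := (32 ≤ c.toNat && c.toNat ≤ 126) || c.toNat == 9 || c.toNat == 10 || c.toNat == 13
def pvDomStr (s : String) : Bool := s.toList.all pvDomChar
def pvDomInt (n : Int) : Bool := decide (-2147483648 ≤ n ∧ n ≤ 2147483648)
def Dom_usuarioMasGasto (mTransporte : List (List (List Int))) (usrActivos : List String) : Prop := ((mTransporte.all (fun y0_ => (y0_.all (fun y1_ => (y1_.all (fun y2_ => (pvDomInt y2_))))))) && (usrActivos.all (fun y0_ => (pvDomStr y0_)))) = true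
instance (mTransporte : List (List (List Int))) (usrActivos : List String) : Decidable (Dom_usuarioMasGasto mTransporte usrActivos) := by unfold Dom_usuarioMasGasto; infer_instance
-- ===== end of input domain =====

-- B replaces A's three accumulation passes + max() + list.index() by one pass keeping a running strict-'>' argmax (objective: simpler).

-- ===== PORT A =====
-- Literal port of A's code; the pyGetD/pySetD defaults are unreachable on inputs satisfying Pre_.
def usuarioMasGasto (mTransporte : List (List (List Int))) (usrActivos : List String) : String × Int :=
  let gastos0 : List Int := (List.range usrActivos.length).map (fun _ => 0)
  let gastosTotales : List Int :=
    (PySem.List.pyRange 0 3 1).foldl (fun g h =>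
      (PySem.List.pyRange 0 (usrActivos.length) 1).foldl (fun g i =>
        PySem.List.pySetD g i (PySem.List.pyGetD g i 0 +
          (PySem.List.pyGetD (PySem.List.pyGetD mTransporte h []) i []).sum)) g) gastos0
  let maxGasto : Int := (PySem.List.max? gastosTotales (fun y => y)).getD 0
  let usuarioMaxGasto : String :=
    PySem.List.pyGetD usrActivos (((PySem.List.index? gastosTotales maxGasto).getD 0 : Nat) : Int) ""
  (usuarioMaxGasto, maxGasto)

-- ===== PORT B =====
-- Literal port of Source B: fold over enumerate(usrActivos) with Option best; best is some _ after a nonempty loop.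
def usuarioMasGasto_alt (mTransporte : List (List (List Int))) (usrActivos : List String) : String × Int :=
  let best : Option (String × Int) :=
    (PySem.List.enumerate usrActivos 0).foldl (fun best p =>
      let total : Int :=
        (PySem.List.pyGetD (PySem.List.pyGetD mTransporte 0 []) p.1 []).sum +
        (PySem.List.pyGetD (PySem.List.pyGetD mTransporte 1 []) p.1 []).sum +
        (PySem.List.pyGetD (PySem.List.pyGetD mTransporte 2 []) p.1 []).sum
      match best with
      | none => some (p.2, total)
      | some b => if b.2 < total then some (p.2, total) else some b) none
  best.getD ("", 0)

-- ===== PRECONDITION & SPEC =====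
-- Pre_ excludes exactly the inputs where Python A raises: max([]) (ValueError) on empty usrActivos, and
-- IndexError when mTransporte has fewer than 3 matrices or one of the first 3 has fewer rows than users.
def Pre_usuarioMasGasto (mTransporte : List (List (List Int))) (usrActivos : List String) : Prop :=
  usrActivos ≠ [] ∧ 3 ≤ mTransporte.length ∧
    ∀ row ∈ mTransporte.take 3, usrActivos.length ≤ row.length
instance (mTransporte : List (List (List Int))) (usrActivos : List String) : Decidable (Pre_usuarioMasGasto mTransporte usrActivos) := by unfold Pre_usuarioMasGasto; infer_instance
def pvWitness_usuarioMasGasto : List (List (List Int)) × List String :=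
  ([[[1], [2]], [[0], [4]], [[3], [1]]], ["ana", "bob"])

def Spec_usuarioMasGasto (mTransporte : List (List (List Int))) (usrActivos : List String) (out : String × Int) : Prop := out = usuarioMasGasto_alt mTransporte usrActivos
instance (mTransporte : List (List (List Int))) (usrActivos : List String) (out : String × Int) : Decidable (Spec_usuarioMasGasto mTransporte usrActivos out) := by unfold Spec_usuarioMasGasto; infer_instance

-- ===== CLAIM (what is proved, stated in full; the proofs are below) =====
def Claim_equal_usuarioMasGasto : Prop := ∀ (mTransporte : List (List (List Int))) (usrActivos : List String), Dom_usuarioMasGasto mTransporte usrActivos → Pre_usuarioMasGasto mTransporte usrActivos → Spec_usuarioMasGasto mTransporte usrActivos (usuarioMasGasto mTransporte usrActivos)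

-- ===== LEMMAS AND PROOFS =====

-- per-user total, grouped as B computes it
def pvF (m : List (List (List Int))) (i : Int) : Int :=
  (PySem.List.pyGetD (PySem.List.pyGetD m 0 []) i []).sum +
  (PySem.List.pyGetD (PySem.List.pyGetD m 1 []) i []).sum +
  (PySem.List.pyGetD (PySem.List.pyGetD m 2 []) i []).sum

def pvT (m : List (List (List Int))) (n : Nat) : List Int :=
  (List.range n).map (fun k : Nat => pvF m (k : Int))

-- running max of a nonempty list, as Python's max computes it
def pvMx : List Int → Int
  | [] => 0
  | t :: r => r.foldl max t

lemma pvMx_eq_max? (v : List Int) (h : v ≠ []) :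
    (PySem.List.max? v (fun y => y)).getD 0 = pvMx v := by
  cases v with
  | nil => simp at h
  | cons t r => rw [PySem.List.max?_id_cons]; rfl

lemma le_pvMx (v : List Int) (y : Int) (hy : y ∈ v) : y ≤ pvMx v := by
  cases v with
  | nil => simp at hy
  | cons t r =>
    rcases List.mem_cons.mp hy with h | h
    · subst h; exact (PySem.List.le_foldl_max r y).1
    · exact (PySem.List.le_foldl_max r t).2 y h

lemma pvMx_mem (v : List Int) (h : v ≠ []) : pvMx v ∈ v := by
  cases v with
  | nil => simp at h
  | cons t r =>
    rcases PySem.List.foldl_max_mem r t with h1 | h1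
    · rw [pvMx, h1]; exact List.mem_cons_self
    · exact List.mem_cons_of_mem _ h1

lemma pvMx_append_singleton (v : List Int) (h : v ≠ []) (a : Int) :
    pvMx (v ++ [a]) = max (pvMx v) a := by
  cases v with
  | nil => simp at h
  | cons t r => simp [pvMx, List.foldl_append]

-- one accumulation pass of A adds f i at every index i < k
lemma pvPass (f : Int → Int) (k : Nat) (g : List Int) (hk : k ≤ g.length) :
    (PySem.List.pyRange 0 k 1).foldl
        (fun g i => PySem.List.pySetD g i (PySem.List.pyGetD g i 0 + f i)) g
      = ((List.range k).map (fun i => g.getD i 0 + f (i : Int))) ++ g.drop k := by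
  induction k with
  | zero => simp [PySem.List.pyRange_one_eq_nil]
  | succ k ih =>
    have hk' : k ≤ g.length := Nat.le_of_succ_le hk
    have hklt : k < g.length := hk
    have hsplit : PySem.List.pyRange 0 ((k + 1 : Nat) : Int) 1
        = PySem.List.pyRange 0 (k : Nat) 1 ++ [(k : Int)] := by
      push_cast
      exact PySem.List.pyRange_one_succ_right (by positivity)
    rw [hsplit, List.foldl_append, ih hk']
    simp only [List.foldl_cons, List.foldl_nil]
    rw [PySem.List.pyGetD_natCast, PySem.List.pySetD_natCast]
    have hlenmap : ((List.range k).map (fun i => g.getD i 0 + f (i : Int))).length = k := by simp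
    have hgetk :
        (((List.range k).map (fun i => g.getD i 0 + f (i : Int))) ++ g.drop k).getD k 0
          = g.getD k 0 := by
      rw [List.getD_eq_getElem?_getD, List.getElem?_append_right (by omega)]
      rw [hlenmap]
      simp only [Nat.sub_self]
      rw [List.getElem?_drop]
      rw [List.getD_eq_getElem?_getD]
      simp
    rw [hgetk]
    have hdrop : g.drop k = g[k] :: g.drop (k + 1) := List.drop_eq_getElem_cons hklt
    rw [hdrop]
    rw [List.set_append_right _ _ (by omega)]
    rw [hlenmap]
    simp only [Nat.sub_self, List.set_cons_zero]
    rw [List.range_succ, List.map_append]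
    simp [List.getD_eq_getElem?_getD, hklt]

lemma pvPassMap (f : Int → Int) (G : Nat → Int) (n : Nat) :
    (PySem.List.pyRange 0 (n : Int) 1).foldl
        (fun g i => PySem.List.pySetD g i (PySem.List.pyGetD g i 0 + f i))
        ((List.range n).map G)
      = (List.range n).map (fun i => G i + f (i : Int)) := by
  rw [pvPass f n _ (by simp)]
  rw [show (List.drop n ((List.range n).map G)) = [] from by simp, List.append_nil]
  refine List.map_congr_left (fun i hi => ?_)
  rw [List.getD_eq_getElem?_getD]
  simp [List.mem_range.mp hi]

lemma pvGastos_eq (m : List (List (List Int))) (us : List String) :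
    (PySem.List.pyRange 0 3 1).foldl (fun g h =>
      (PySem.List.pyRange 0 (us.length) 1).foldl (fun g i =>
        PySem.List.pySetD g i (PySem.List.pyGetD g i 0 +
          (PySem.List.pyGetD (PySem.List.pyGetD m h []) i []).sum)) g)
      ((List.range us.length).map (fun _ => 0))
    = pvT m us.length := by
  have h3 : PySem.List.pyRange 0 3 1 = [0, 1, 2] := by decide
  rw [h3]
  simp only [List.foldl_cons, List.foldl_nil]
  set n := us.length
  rw [pvPassMap (fun i => (PySem.List.pyGetD (PySem.List.pyGetD m 0 []) i []).sum)
      (fun _ => 0) n]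
  rw [pvPassMap (fun i => (PySem.List.pyGetD (PySem.List.pyGetD m 1 []) i []).sum)
      (fun i => 0 + (PySem.List.pyGetD (PySem.List.pyGetD m 0 []) (i : Int) []).sum) n]
  rw [pvPassMap (fun i => (PySem.List.pyGetD (PySem.List.pyGetD m 2 []) i []).sum)
      (fun i => 0 + (PySem.List.pyGetD (PySem.List.pyGetD m 0 []) (i : Int) []).sum
        + (PySem.List.pyGetD (PySem.List.pyGetD m 1 []) (i : Int) []).sum) n]
  unfold pvT
  refine List.map_congr_left (fun i hi => ?_)
  unfold pvF
  ring

-- B's loop step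
def pvStep (m : List (List (List Int))) (best : Option (String × Int)) (p : Int × String) :
    Option (String × Int) :=
  let total : Int :=
    (PySem.List.pyGetD (PySem.List.pyGetD m 0 []) p.1 []).sum +
    (PySem.List.pyGetD (PySem.List.pyGetD m 1 []) p.1 []).sum +
    (PySem.List.pyGetD (PySem.List.pyGetD m 2 []) p.1 []).sum
  match best with
  | none => some (p.2, total)
  | some b => if b.2 < total then some (p.2, total) else some b

lemma pvIdx_lt (v : List Int) (x : Int) (hx : x ∈ v) :
    (PySem.List.index? v x).getD 0 < v.length ∧
      v.getD ((PySem.List.index? v x).getD 0) 0 = x := by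
  rcases Option.isSome_iff_exists.mp ((PySem.List.index?_isSome_iff v x).mpr hx) with ⟨k, hk⟩
  rcases PySem.List.getElem_of_index?_eq_some hk with ⟨hklt, hkv, _⟩
  rw [hk]
  exact ⟨hklt, by simp [List.getD_eq_getElem?_getD, hklt, hkv]⟩

-- main invariant: B's fold computes A's (first argmax user, max) over the totals list pvT
lemma pvMain (m : List (List (List Int))) :
    ∀ (us : List String), us ≠ [] →
      (PySem.List.enumerate us 0).foldl (pvStep m) none
        = some (PySem.List.pyGetD us
                  (((PySem.List.index? (pvT m us.length) (pvMx (pvT m us.length))).getD 0 : Nat) : Int) "",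
                pvMx (pvT m us.length)) := by
  intro us
  induction us using List.reverseRecOn with
  | nil => intro h; simp at h
  | append_singleton xs x ih =>
    intro _
    rw [PySem.List.enumerate_append, List.foldl_append]
    have hTsucc : pvT m (xs ++ [x]).length = pvT m xs.length ++ [pvF m (xs.length : Int)] := by
      unfold pvT
      rw [List.length_append, List.length_singleton, List.range_succ, List.map_append]
      rfl
    rcases eq_or_ne xs [] with hnil | hne
    · subst hnil
      simp only [PySem.List.enumerate_nil, List.foldl_nil, List.nil_append]
      rw [PySem.List.enumerate_cons, PySem.List.enumerate_nil]
      simp only [List.foldl_cons, List.foldl_nil]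
      rw [show pvT m ([x] : List String).length = [pvF m 0] from by unfold pvT; simp]
      rw [show pvMx [pvF m 0] = pvF m 0 from rfl]
      rw [PySem.List.index?_cons_self]
      simp only [Option.getD_some, Nat.cast_zero, PySem.List.pyGetD_zero_cons]
      show pvStep m none ((0 : Int), x) = some (x, pvF m 0)
      unfold pvStep pvF
      rfl
    · rw [ih hne]
      have hTne : pvT m xs.length ≠ [] := by
        unfold pvT
        simp only [ne_eq, List.map_eq_nil_iff, List.range_eq_nil]
        intro h0
        exact hne (List.length_eq_zero_iff.mp h0)
      set v := pvT m xs.length with hv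
      set a := pvF m (xs.length : Int) with ha
      have hTlen : v.length = xs.length := by rw [hv]; unfold pvT; simp
      rw [hTsucc, pvMx_append_singleton v hTne a]
      rw [PySem.List.enumerate_cons, PySem.List.enumerate_nil]
      simp only [List.foldl_cons, List.foldl_nil]
      rcases lt_or_ge (pvMx v) a with hlt | hge
      · -- new element strictly bigger: becomes the unique argmax
        have hmax : max (pvMx v) a = a := max_eq_right (le_of_lt hlt)
        have hnotmem : a ∉ v := fun hmem => absurd (le_pvMx v a hmem) (not_le.mpr hlt)
        rw [hmax, PySem.List.index?_append_singleton_self v a hnotmem]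
        have hstep : pvStep m (some (PySem.List.pyGetD xs
            (((PySem.List.index? v (pvMx v)).getD 0 : Nat) : Int) "", pvMx v))
            ((0 + (xs.length : Int) : Int), x) = some (x, a) := by
          unfold pvStep
          simp only [zero_add]
          rw [if_pos (by rw [ha] at hlt; unfold pvF at hlt; exact hlt)]
          rw [ha]
          unfold pvF
          rfl
        rw [hstep]
        simp only [Option.getD_some]
        rw [hTlen]
        have : PySem.List.pyGetD (xs ++ [x]) ((xs.length : Nat) : Int) "" = x := by
          rw [PySem.List.pyGetD_natCast, List.getD_eq_getElem?_getD,
            List.getElem?_append_right (le_refl _)]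
          simp
        rw [this]
      · -- old max stays: old first argmax stays
        have hmax : max (pvMx v) a = pvMx v := max_eq_left hge
        have hmem : pvMx v ∈ v := pvMx_mem v hTne
        rw [hmax, PySem.List.index?_append_of_mem [a] hmem]
        have hstep : pvStep m (some (PySem.List.pyGetD xs
            (((PySem.List.index? v (pvMx v)).getD 0 : Nat) : Int) "", pvMx v))
            ((0 + (xs.length : Int) : Int), x)
            = some (PySem.List.pyGetD xs
                (((PySem.List.index? v (pvMx v)).getD 0 : Nat) : Int) "", pvMx v) := by
          unfold pvStep
          simp only [zero_add]
          rw [if_neg (by rw [ha] at hge; unfold pvF at hge; simpa using not_lt.mpr hge)]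
        rw [hstep]
        have hidx := pvIdx_lt v (pvMx v) hmem
        have : PySem.List.pyGetD (xs ++ [x])
            (((PySem.List.index? v (pvMx v)).getD 0 : Nat) : Int) ""
            = PySem.List.pyGetD xs (((PySem.List.index? v (pvMx v)).getD 0 : Nat) : Int) "" := by
          rw [PySem.List.pyGetD_natCast, PySem.List.pyGetD_natCast,
            List.getD_eq_getElem?_getD, List.getD_eq_getElem?_getD,
            List.getElem?_append_left (by omega : (PySem.List.index? v (pvMx v)).getD 0 < xs.length)]
        rw [this]

-- ===== VERDICT (by name: the statement is the Claim_ definition above) =====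
theorem usuarioMasGasto_spec : Claim_equal_usuarioMasGasto := by
  intro m us _ hpre
  rcases hpre with ⟨hne, _, _⟩
  simp only [Spec_usuarioMasGasto, usuarioMasGasto, usuarioMasGasto_alt]
  rw [pvGastos_eq m us]
  have hTne : pvT m us.length ≠ [] := by
    unfold pvT
    simp only [ne_eq, List.map_eq_nil_iff, List.range_eq_nil]
    intro h0
    exact hne (List.length_eq_zero_iff.mp h0)
  rw [pvMx_eq_max? _ hTne]
  have := pvMain m us hne
  rw [show (PySem.List.enumerate us 0).foldl (fun best p =>
      match best with
      | none => some (p.2,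
          (PySem.List.pyGetD (PySem.List.pyGetD m 0 []) p.1 []).sum +
          (PySem.List.pyGetD (PySem.List.pyGetD m 1 []) p.1 []).sum +
          (PySem.List.pyGetD (PySem.List.pyGetD m 2 []) p.1 []).sum)
      | some b => if b.2 <
          (PySem.List.pyGetD (PySem.List.pyGetD m 0 []) p.1 []).sum +
          (PySem.List.pyGetD (PySem.List.pyGetD m 1 []) p.1 []).sum +
          (PySem.List.pyGetD (PySem.List.pyGetD m 2 []) p.1 []).sum then some (p.2,
          (PySem.List.pyGetD (PySem.List.pyGetD m 0 []) p.1 []).sum +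
          (PySem.List.pyGetD (PySem.List.pyGetD m 1 []) p.1 []).sum +
          (PySem.List.pyGetD (PySem.List.pyGetD m 2 []) p.1 []).sum) else some b) none
    = (PySem.List.enumerate us 0).foldl (pvStep m) none from rfl]
  rw [this]
  rfl
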